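-- pv_equiv track=rewrite | github.com/nhajouji/SuperSingularEllipticCurves | supersingularclass.py | chooseNonSquare
-- ===== SOURCE A (Python) =====
-- def chooseNonSquare(p):
--     if p % 4 == 3:
--         return -1
--     elif p % 3 == 2:
--         return -3
--     elif p % 8 == 5:
--         return -2
--     for d in [-7,-11,-19,-43,-67,-163]:
--         q = -d
--         sqs = [a**2 % q for a in range(1,(q+1)//2)]
--         p0 = p % q
--         if p0 not in sqs:
--             return d
--     return "Couldn't find one - make sure p is an odd prime, and p < 15073 "
-- ===== SOURCE B (Python) =====
-- def chooseNonSquare(p):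
--     # table-driven congruence guards, then Euler's criterion via modular exponentiation
--     guard = next((d for m, r, d in ((4, 3, -1), (3, 2, -3), (8, 5, -2)) if p % m == r), None)
--     if guard is not None:
--         return guard
--     hit = next((d for d in (-7, -11, -19, -43, -67, -163)
--                 if pow(p % -d, (-d - 1) // 2, -d) != 1), None)
--     if hit is not None:
--         return hit
--     return "Couldn't find one - make sure p is an odd prime, and p < 15073 "
-- ===== Notes on version B (the rewrite author's own statement) =====
-- stated objective: alternative
-- what changed: The if/elif guard chain becomes a table lookup over (modulus, residue, value) triples, and the per-discriminant squares-list construction plus membership scan is replaced by Euler's criterion (a single modular exponentiation pow(p%q,(q-1)//2,q) != 1), with next() over generators instead of an explicit for loop.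
import Mathlib
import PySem

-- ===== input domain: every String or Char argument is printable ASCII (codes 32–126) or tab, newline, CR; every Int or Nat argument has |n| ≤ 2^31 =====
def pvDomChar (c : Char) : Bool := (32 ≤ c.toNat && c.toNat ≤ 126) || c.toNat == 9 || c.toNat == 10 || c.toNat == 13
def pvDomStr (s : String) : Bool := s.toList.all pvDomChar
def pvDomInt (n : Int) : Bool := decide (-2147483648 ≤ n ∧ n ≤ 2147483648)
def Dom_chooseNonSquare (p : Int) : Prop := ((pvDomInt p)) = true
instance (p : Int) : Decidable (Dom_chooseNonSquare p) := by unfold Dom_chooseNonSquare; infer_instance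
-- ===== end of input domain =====

-- B replaces A's if-chain and explicit squares-mod-q membership scan by a table-driven
-- guard lookup and Euler's criterion (one modular exponentiation per discriminant).

-- ===== PORT A =====
-- sqs = [a**2 % q for a in range(1,(q+1)//2)]
def sqsA (q : Int) : List Int :=
  (PySem.List.pyRange 1 (PySem.Int.floordiv (q + 1) 2) 1).map (fun a => PySem.Int.mod (a ^ 2) q)

-- the 'for d in [...]' loop; none = fell through (Python A returns the error string there)
def loopA (p : Int) : List Int → Option Int
  | [] => none
  | d :: ds =>
    let q := -d
    let p0 := PySem.Int.mod p q
    if p0 ∉ sqsA q then some d else loopA p ds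

def chooseNonSquare (p : Int) : Int :=
  if PySem.Int.mod p 4 = 3 then -1
  else if PySem.Int.mod p 3 = 2 then -3
  else if PySem.Int.mod p 8 = 5 then -2
  else (loopA p [-7, -11, -19, -43, -67, -163]).getD 0

-- ===== PORT B =====
-- Python's built-in pow(b, e, m) for b ≥ 0, e ≥ 0, m > 0 (exact on B's arguments here)
def powmodB (b e m : Int) : Int := ((b.toNat ^ e.toNat) % m.toNat : Nat)

-- 'pow(p % -d, (-d - 1) // 2, -d) != 1'
def eulerHit (p d : Int) : Bool :=
  powmodB (PySem.Int.mod p (-d)) (PySem.Int.floordiv (-d - 1) 2) (-d) != 1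

def chooseNonSquare_alt (p : Int) : Int :=
  match ([(4, 3, -1), (3, 2, -3), (8, 5, -2)] : List (Int × Int × Int)).find?
      (fun t => PySem.Int.mod p t.1 == t.2.1) with
  | some t => t.2.2
  | none =>
    match ([-7, -11, -19, -43, -67, -163] : List Int).find? (eulerHit p) with
    | some d => d
    | none => 0

-- ===== PRECONDITION & SPEC =====
-- Pre_ excludes exactly the p on which Python A falls through all tests and returns the
-- error STRING (not an int): those p whose residue mod every q in {7,11,19,43,67,163}
-- is a nonzero square mod q (and none of the three modular guards fires).
def Pre_chooseNonSquare (p : Int) : Prop :=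
  p % 4 = 3 ∨ p % 3 = 2 ∨ p % 8 = 5 ∨
    ∃ q ∈ ([7, 11, 19, 43, 67, 163] : List Int),
      ¬ ∃ a ∈ Finset.Icc 1 (q - 1).toNat, ((a : Int) * (a : Int)) % q = p % q
instance (p : Int) : Decidable (Pre_chooseNonSquare p) := by unfold Pre_chooseNonSquare; infer_instance

def pvWitness_chooseNonSquare : Int := 13

def Spec_chooseNonSquare (p : Int) (out : Int) : Prop := out = chooseNonSquare_alt p
instance (p : Int) (out : Int) : Decidable (Spec_chooseNonSquare p out) := by unfold Spec_chooseNonSquare; infer_instance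

-- ===== CLAIM (what is proved, stated in full; the proofs are below) =====
def Claim_equal_chooseNonSquare : Prop := ∀ (p : Int), Dom_chooseNonSquare p → Pre_chooseNonSquare p → Spec_chooseNonSquare p (chooseNonSquare p)

-- ===== LEMMAS AND PROOFS =====

-- the per-discriminant tests agree: for 0 ≤ n < q (q one of the six primes),
-- n ∈ sqsA q  ↔  pow(n, (q-1)//2, q) = 1
set_option maxRecDepth 10000 in
set_option maxHeartbeats 2000000 in
lemma test_eq_nat (q : Int) (hq : q ∈ ([7, 11, 19, 43, 67, 163] : List Int)) :
    ∀ n : Nat, n < q.toNat →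
      (((n : Int) ∈ sqsA q) ↔ powmodB (n : Int) (PySem.Int.floordiv (q - 1) 2) q = 1) := by
  fin_cases hq <;> decide

lemma test_eq (q p : Int) (hq : q ∈ ([7, 11, 19, 43, 67, 163] : List Int)) :
    ((PySem.Int.mod p q ∈ sqsA q) ↔ eulerHit p (-q) = false) := by
  have hqpos : (0 : Int) < q := by fin_cases hq <;> decide
  have hm : PySem.Int.mod p q = p % q := PySem.Int.mod_eq_emod_of_pos hqpos
  have h0 : 0 ≤ p % q := Int.emod_nonneg p (by omega)
  have hlt : p % q < q := Int.emod_lt_of_pos p hqpos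
  have hcast : ((p % q).toNat : Int) = p % q := Int.toNat_of_nonneg h0
  have hn : (p % q).toNat < q.toNat := by omega
  have h := test_eq_nat q hq (p % q).toNat hn
  rw [hcast] at h
  simp only [eulerHit, neg_neg, bne_eq_false_iff_eq, hm]
  exact h

-- A's loop equals find? with the Euler test, given the tests agree on each element
lemma loop_find (p : Int) : ∀ L : List Int,
    (∀ d ∈ L, ((PySem.Int.mod p (-d) ∈ sqsA (-d)) ↔ eulerHit p d = false)) →
    loopA p L = L.find? (eulerHit p) := by
  intro L
  induction L with
  | nil => intro _; rfl
  | cons d ds ih =>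
    intro h
    have hd := h d (by simp)
    simp only [loopA, List.find?]
    by_cases hm : PySem.Int.mod p (-d) ∈ sqsA (-d)
    · rw [if_neg (by simp [hm]), hd.mp hm]
      exact ih (fun x hx => h x (by simp [hx]))
    · rw [if_pos hm]
      have : eulerHit p d = true := by
        cases he : eulerHit p d
        · exact absurd (hd.mpr he) hm
        · rfl
      rw [this]

lemma loop_eq (p : Int) :
    loopA p [-7, -11, -19, -43, -67, -163] =
      ([-7, -11, -19, -43, -67, -163] : List Int).find? (eulerHit p) := by
  refine loop_find p _ ?_
  intro d hd
  have : -d ∈ ([7, 11, 19, 43, 67, 163] : List Int) := by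
    fin_cases hd <;> decide
  simpa using test_eq (-d) p this

-- ===== VERDICT (by name: the statement is the Claim_ definition above) =====
theorem chooseNonSquare_spec : Claim_equal_chooseNonSquare := by
  intro p _ _
  unfold Spec_chooseNonSquare chooseNonSquare chooseNonSquare_alt
  rw [PySem.Int.mod_eq_emod_of_pos (by norm_num : (0:Int) < 4),
      PySem.Int.mod_eq_emod_of_pos (by norm_num : (0:Int) < 3),
      PySem.Int.mod_eq_emod_of_pos (by norm_num : (0:Int) < 8), loop_eq]
  by_cases h4 : p % 4 = 3
  · simp [h4]
  by_cases h3 : p % 3 = 2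
  · simp [h4, h3]
  by_cases h8 : p % 8 = 5
  · simp [h4, h3, h8]
  cases hf : ([-7, -11, -19, -43, -67, -163] : List Int).find? (eulerHit p) with
  | none => simp [h4, h3, h8]
  | some d => simp [h4, h3, h8]
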